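-- pv_equiv track=rewrite | github.com/AndreyMozzhegorov/Demo | base_functions.py | rawTOfinal
-- ===== SOURCE A (Python) =====
-- sym = {'alpha': 'α',
--        'beta': 'β',
--        'gamma': 'γ',
--        'delta': 'δ',
--        'eps': 'ε',
--        'dzeta': 'ζ',
--        'eta': 'η',
--        'theta': 'θ',
--        'kappa': 'κ',
--        'la': 'λ',
--        'mu': 'μ',
--        'nu': 'ν',
--        'sigma': 'σ',
--        'tau': 'τ',
--        'phi': 'φ',
--        'rho': 'ρ',
--        'pi': 'π',
--        'Delta': 'Δ',
--        'Sigma': 'Σ',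
--        'Psi': 'Ψ',
--        'Theta': 'Θ',
--        'Omega': 'Ω',
--        '**': '^',
--        '*': '⋅',
--        'x_mass_W': 'x̅_W',
--        'x_mass_F': 'x̅_F',
--        'x_mass_P': 'x̅_P',
--        'x_mass_D': 'x̅_D',
--        'x_mass_os': 'x̅_ос',
--        'x_mass_susp': 'x̅_сусп',
--        'x_mass_f': 'x̅_ф',
--        'x_mass_pr': 'x̅_пр',
--        'x_mass_': 'x̅_',
--        'x_mass': 'x̅',
--        '_mass': '̅',
--        'MB.': '',
--        'sub_BK.M': 'M_BK',
--        'sub_HK.M': 'M_HK',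
--        'sqrt': '√',
--        'tqrt': '∛',
--        'qqrt': '∜',
--        '_starred': '^*',
--        'Pr': 'Рr'}  # Тут разные буквы Р
--
-- def rawTOfinal(raw_form):
--     '''
--     подготовка формул-строк к печати
--     '''
--     raw_list = raw_form.split(' ')
--     final = ''
--     for el in raw_list:
--         if el in sym:
--             final += sym[el]
--             continue
--         answ = ''
--         flag_exp = False
--         for char in el:
--             if flag_exp == True:
--                 flag_exp = False
--                 if char == '+':
--                     continue
--                 else:
--                     answ += char
--             elif char == '@':
--                 answ += ' '
--             elif char == ',':
--                 answ += '.'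
--             elif char == '.':
--                 answ += ','
--             elif (char == 'E') and ('+' in el or '-' in el):
--                 answ += '⋅10^'
--                 flag_exp = True
--             else:
--                 answ += char
--         if ',' in answ and (answ[-2:] == '00' or answ[-3:] == '000') and answ[-3] != ',':
--             answ = answ[:-2]
--         final += answ
--     return final
-- ===== SOURCE B (Python) =====
-- sym = {'alpha': 'α',
--        'beta': 'β',
--        'gamma': 'γ',
--        'delta': 'δ',
--        'eps': 'ε',
--        'dzeta': 'ζ',
--        'eta': 'η',
--        'theta': 'θ',
--        'kappa': 'κ',
--        'la': 'λ',
--        'mu': 'μ',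
--        'nu': 'ν',
--        'sigma': 'σ',
--        'tau': 'τ',
--        'phi': 'φ',
--        'rho': 'ρ',
--        'pi': 'π',
--        'Delta': 'Δ',
--        'Sigma': 'Σ',
--        'Psi': 'Ψ',
--        'Theta': 'Θ',
--        'Omega': 'Ω',
--        '**': '^',
--        '*': '⋅',
--        'x_mass_W': 'x̅_W',
--        'x_mass_F': 'x̅_F',
--        'x_mass_P': 'x̅_P',
--        'x_mass_D': 'x̅_D',
--        'x_mass_os': 'x̅_ос',
--        'x_mass_susp': 'x̅_сусп',
--        'x_mass_f': 'x̅_ф',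
--        'x_mass_pr': 'x̅_пр',
--        'x_mass_': 'x̅_',
--        'x_mass': 'x̅',
--        '_mass': '̅',
--        'MB.': '',
--        'sub_BK.M': 'M_BK',
--        'sub_HK.M': 'M_HK',
--        'sqrt': '√',
--        'tqrt': '∛',
--        'qqrt': '∜',
--        '_starred': '^*',
--        'Pr': 'Рr'}  # Тут разные буквы Р
--
-- _TR = str.maketrans({'@': ' ', ',': '.', '.': ','})
--
--
-- def _exp_rewrite(s):
--     """Rewrite scientific notation: each exponent marker becomes '⋅10^', a plus
--     sign right after the marker is dropped, any other char right after it is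
--     kept untranslated; the chars between occurrences go through the table."""
--     pieces = []
--     while True:
--         j = s.find('E')
--         if j < 0:
--             pieces.append(s.translate(_TR))
--             return ''.join(pieces)
--         pieces.append(s[:j].translate(_TR))
--         pieces.append('⋅10^')
--         if s[j + 1:j + 2] != '+':
--             pieces.append(s[j + 1:j + 2])
--         s = s[j + 2:]
--
--
-- def rawTOfinal(raw_form):
--     '''
--     подготовка формул-строк к печати
--     '''
--     out = []
--     for el in raw_form.split(' '):
--         if el in sym:
--             out.append(sym[el])
--             continue
--         if '+' in el or '-' in el:
--             answ = _exp_rewrite(el)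
--         else:
--             answ = el.translate(_TR)
--         if ',' in answ and answ.endswith('00') and answ[-3] != ',':
--             answ = answ[:-2]
--         out.append(answ)
--     return ''.join(out)
-- ===== Notes on version B (the rewrite author's own statement) =====
-- stated objective: faster
-- what changed: The per-character state machine (flag_exp flag, five elif branches) is replaced by a str.find-the-exponent-marker-and-splice loop for scientific notation plus a position-independent str.translate table for the character swaps, with the trailing-zero trim applied to the assembled token.
import Mathlib
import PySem

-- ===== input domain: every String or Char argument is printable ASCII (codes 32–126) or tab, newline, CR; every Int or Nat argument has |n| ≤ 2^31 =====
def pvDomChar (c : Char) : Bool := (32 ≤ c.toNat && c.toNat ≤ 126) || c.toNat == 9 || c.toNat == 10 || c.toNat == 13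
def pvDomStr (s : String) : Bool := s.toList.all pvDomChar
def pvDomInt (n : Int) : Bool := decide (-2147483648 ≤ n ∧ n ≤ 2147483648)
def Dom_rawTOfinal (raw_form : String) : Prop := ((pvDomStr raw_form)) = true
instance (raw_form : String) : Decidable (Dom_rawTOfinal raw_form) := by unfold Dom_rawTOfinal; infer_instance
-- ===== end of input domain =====

-- ===== PORT A =====
-- B re-decomposes A's per-character state machine into a find-exponent-marker-and-splice loop plus a
-- position-independent translation table; equal return value proved on the stated ASCII domain (A is total).
-- Shared data: the module-level `sym` dict (pure data, used identically by both Pythons).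
def symTable : PySem.Dict String String :=
  PySem.Dict.ofList [("alpha", "α"), ("beta", "β"), ("gamma", "γ"), ("delta", "δ"), ("eps", "ε"),
   ("dzeta", "ζ"), ("eta", "η"), ("theta", "θ"), ("kappa", "κ"), ("la", "λ"),
   ("mu", "μ"), ("nu", "ν"), ("sigma", "σ"), ("tau", "τ"), ("phi", "φ"),
   ("rho", "ρ"), ("pi", "π"), ("Delta", "Δ"), ("Sigma", "Σ"), ("Psi", "Ψ"),
   ("Theta", "Θ"), ("Omega", "Ω"), ("**", "^"), ("*", "⋅"),
   ("x_mass_W", "x̅_W"), ("x_mass_F", "x̅_F"), ("x_mass_P", "x̅_P"),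
   ("x_mass_D", "x̅_D"), ("x_mass_os", "x̅_ос"), ("x_mass_susp", "x̅_сусп"),
   ("x_mass_f", "x̅_ф"), ("x_mass_pr", "x̅_пр"), ("x_mass_", "x̅_"),
   ("x_mass", "x̅"), ("_mass", "̅"), ("MB.", ""), ("sub_BK.M", "M_BK"),
   ("sub_HK.M", "M_HK"), ("sqrt", "√"), ("tqrt", "∛"), ("qqrt", "∜"),
   ("_starred", "^*"), ("Pr", "Рr")]


-- A's inner character loop: state (answ, flag_exp), branches in A's order.
def aStep (el : List Char) (st : List Char × Bool) (c : Char) : List Char × Bool :=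
  if st.2 = true then
    if c = '+' then (st.1, false) else (st.1 ++ [c], false)
  else if c = '@' then (st.1 ++ [' '], false)
  else if c = ',' then (st.1 ++ ['.'], false)
  else if c = '.' then (st.1 ++ [','], false)
  else if c = 'E' ∧ ('+' ∈ el ∨ '-' ∈ el) then (st.1 ++ ['⋅', '1', '0', '^'], true)
  else (st.1 ++ [c], false)

-- A's trailing-zero trim; answ[-3] is always in range when the first two conjuncts
-- hold (Python's short-circuit `and`), so pyGet? never returns none on a taken branch.
def aTrim (answ : List Char) : List Char :=
  if ',' ∈ answ ∧
     (PySem.List.slice answ (some (-2)) none = ['0', '0'] ∨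
      PySem.List.slice answ (some (-3)) none = ['0', '0', '0']) ∧
     PySem.List.pyGet? answ (-3) ≠ some ','
  then PySem.List.slice answ none (some (-2)) else answ

def aToken (el : List Char) : List Char :=
  aTrim (el.foldl (aStep el) ([], false)).1

def rawTOfinal (raw_form : String) : String :=
  String.ofList (((PySem.Str.split? raw_form " ").getD []).foldl
    (fun final el =>
      match PySem.Dict.get? symTable el with
      | some v => final ++ v.toList
      | none => final ++ aToken el.toList) [])

-- ===== PORT B =====
-- the translation table _TR
def trTR (c : Char) : Char :=
  if c = '@' then ' ' else if c = ',' then '.' else if c = '.' then ',' else c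

-- Source B's _exp_rewrite: find the next exponent marker, translate the piece before it, emit '⋅10^',
-- keep the char right after it unless it is a plus sign, continue past that char.
def expRewrite (s : List Char) : List Char :=
  let j := PySem.Chars.find s ['E']
  if _h : j < 0 then s.map trTR
  else
    (PySem.List.slice s none (some j)).map trTR ++ ['⋅', '1', '0', '^'] ++
    (if PySem.List.slice s (some (j + 1)) (some (j + 2)) = ['+'] then []
     else PySem.List.slice s (some (j + 1)) (some (j + 2))) ++
    expRewrite (PySem.List.slice s (some (j + 2)) none)
termination_by s.length
decreasing_by
  have h0 : (0 : Int) ≤ j := by omega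
  have hinf : ['E'] <:+: s := (PySem.Chars.find_nonneg_iff s ['E']).mp h0
  have hne : s ≠ [] := by
    intro hs; rw [hs] at hinf
    exact by simpa using hinf.sublist.length_le
  rw [PySem.List.slice_from s (by omega : (0:Int) ≤ j + 2)]
  have hlen : 0 < s.length := List.length_pos_iff.mpr hne
  have : 0 < (j + 2).toNat := by omega
  simp only [List.length_drop]
  omega

def bToken (el : List Char) : List Char :=
  let answ := if '+' ∈ el ∨ '-' ∈ el then expRewrite el else el.map trTR
  if ',' ∈ answ ∧ PySem.Chars.endswith answ ['0', '0'] = true ∧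
     PySem.List.pyGet? answ (-3) ≠ some ','
  then PySem.List.slice answ none (some (-2)) else answ

def rawTOfinal_alt (raw_form : String) : String :=
  String.ofList ((((PySem.Str.split? raw_form " ").getD []).foldl
    (fun out el =>
      out ++ [match PySem.Dict.get? symTable el with
              | some v => v.toList
              | none => bToken el.toList]) []).flatten)

-- ===== PRECONDITION & SPEC =====
def Spec_rawTOfinal (raw_form : String) (out : String) : Prop := out = rawTOfinal_alt raw_form
instance (raw_form : String) (out : String) : Decidable (Spec_rawTOfinal raw_form out) := by unfold Spec_rawTOfinal; infer_instance

-- ===== CLAIM (what is proved, stated in full; the proofs are below) =====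
def Claim_equal_rawTOfinal : Prop := ∀ (raw_form : String), Dom_rawTOfinal raw_form → Spec_rawTOfinal raw_form (rawTOfinal raw_form)

-- ===== LEMMAS AND PROOFS =====

theorem find_eq_of_first (s sub : List Char) (k : Nat)
    (hp : sub <+: s.drop k) (hmin : ∀ i < k, ¬ sub <+: s.drop i) :
    PySem.Chars.find s sub = (k : Int) := by
  have hinf : sub <:+: s := hp.isInfix.trans (List.drop_suffix k s).isInfix
  have h0 : 0 ≤ PySem.Chars.find s sub := (PySem.Chars.find_nonneg_iff s sub).mpr hinf
  obtain ⟨hq, hqmin⟩ := PySem.Chars.find_spec h0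
  rcases lt_trichotomy (PySem.Chars.find s sub).toNat k with h | h | h
  · exact absurd hq (hmin _ h)
  · omega
  · exact absurd hp (hqmin _ h)

theorem find_cons_self (t : List Char) : PySem.Chars.find ('E' :: t) ['E'] = 0 := by
  have := find_eq_of_first ('E'::t) ['E'] 0 ⟨t, rfl⟩ (by omega)
  simpa using this

theorem prefix_singleton (x c : Char) (t : List Char) : [x] <+: (c :: t) ↔ x = c := by
  constructor
  · rintro ⟨r, hr⟩; simp at hr; exact hr.1
  · rintro rfl; exact ⟨t, rfl⟩

theorem find_cons_ne_none (c : Char) (t : List Char) (hc : c ≠ 'E')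
    (h : PySem.Chars.find t ['E'] = -1) : PySem.Chars.find (c :: t) ['E'] = -1 := by
  rw [PySem.Chars.find_eq_neg_one_iff] at h ⊢
  intro hinf
  have : 'E' ∈ c :: t := by
    obtain ⟨p, q, hpq⟩ := hinf
    have : 'E' ∈ p ++ ['E'] ++ q := by simp
    rwa [hpq] at this
  rw [List.mem_cons] at this
  rcases this with he | hmem
  · exact hc he.symm
  · exact h ((List.singleton_infix_iff 'E' t).mpr hmem)

theorem find_cons_ne_some (c : Char) (t : List Char) (hc : c ≠ 'E')
    (h : 0 ≤ PySem.Chars.find t ['E']) :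
    PySem.Chars.find (c :: t) ['E'] = PySem.Chars.find t ['E'] + 1 := by
  obtain ⟨hq, hqmin⟩ := PySem.Chars.find_spec h
  have := find_eq_of_first (c :: t) ['E'] ((PySem.Chars.find t ['E']).toNat + 1)
    (by simpa using hq)
    (by rintro (_ | i) hi
        · simp only [List.drop_zero]
          rw [prefix_singleton]; exact fun he => hc he.symm
        · simpa using hqmin i (by omega))
  rw [this]; omega

theorem expRewrite_nil : expRewrite [] = [] := by
  have h : PySem.Chars.find [] ['E'] = -1 := by
    rw [PySem.Chars.find_eq_neg_one_iff]; intro h; simpa using h.sublist.length_le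
  unfold expRewrite
  rw [h, dif_pos (by omega)]; simp

theorem expRewrite_cons_E (t : List Char) :
    expRewrite ('E' :: t) =
      '⋅' :: '1' :: '0' :: '^' ::
      (match t with
       | [] => []
       | d :: t' => (if d = '+' then [] else [d]) ++ expRewrite t') := by
  conv_lhs => unfold expRewrite
  rw [find_cons_self]
  rw [dif_neg (by omega)]
  rw [PySem.List.slice_to _ (by omega : (0:Int) ≤ 0)]
  rw [PySem.List.slice_toNat _ (by omega : (0:Int) ≤ 0+1) (by omega : (0:Int) ≤ 0+2)]
  rw [PySem.List.slice_from _ (by omega : (0:Int) ≤ 0+2)]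
  norm_num
  simp only [show ((2:Int)).toNat = 2 from rfl]
  match t with
  | [] =>
    simp only [List.drop_succ_cons, List.drop_nil, List.take_nil]
    norm_num [expRewrite_nil]
  | d :: t' =>
    simp only [List.drop_succ_cons, List.drop_zero, List.take_succ_cons, List.take_zero]
    by_cases hd : d = '+' <;> simp [hd]

theorem expRewrite_cons_ne (c : Char) (t : List Char) (hc : c ≠ 'E') :
    expRewrite (c :: t) = trTR c :: expRewrite t := by
  by_cases hf : PySem.Chars.find t ['E'] < 0
  · have ht : PySem.Chars.find t ['E'] = -1 := by
      have := PySem.Chars.neg_one_le_find t ['E']; omega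
    have hct := find_cons_ne_none c t hc ht
    unfold expRewrite
    simp only [ht, hct]
    rw [dif_pos (by omega), dif_pos (by omega)]
    simp
  · have h0 : 0 ≤ PySem.Chars.find t ['E'] := by omega
    have hct := find_cons_ne_some c t hc h0
    set jt := PySem.Chars.find t ['E'] with hjt
    unfold expRewrite
    simp only [hct, ← hjt]
    rw [dif_neg (by omega), dif_neg (by omega)]
    rw [PySem.List.slice_to _ (by omega : (0:Int) ≤ jt + 1),
        PySem.List.slice_to _ h0,
        PySem.List.slice_toNat _ (by omega : (0:Int) ≤ jt + 1 + 1) (by omega : (0:Int) ≤ jt + 1 + 2),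
        PySem.List.slice_toNat _ (by omega : (0:Int) ≤ jt + 1) (by omega : (0:Int) ≤ jt + 2),
        PySem.List.slice_from _ (by omega : (0:Int) ≤ jt + 1 + 2),
        PySem.List.slice_from _ (by omega : (0:Int) ≤ jt + 2)]
    have e1 : (jt + 1).toNat = jt.toNat + 1 := by omega
    have e2 : (jt + 1 + 1).toNat = jt.toNat + 2 := by omega
    have e3 : (jt + 1 + 2).toNat = jt.toNat + 3 := by omega
    have e4 : (jt + 2).toNat = jt.toNat + 2 := by omega
    simp [e1, e2, e3, e4, List.take_succ_cons, List.drop_succ_cons]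

theorem aStep_ne (el : List Char) (acc : List Char) (c : Char)
    (h : ¬ (c = 'E' ∧ ('+' ∈ el ∨ '-' ∈ el))) :
    aStep el (acc, false) c = (acc ++ [trTR c], false) := by
  unfold aStep trTR
  by_cases h1 : c = '@' <;> by_cases h2 : c = ',' <;> by_cases h3 : c = '.' <;>
    simp_all

theorem aFold_no_exp (el l : List Char) (acc : List Char)
    (h : ¬ ('+' ∈ el ∨ '-' ∈ el)) :
    l.foldl (aStep el) (acc, false) = (acc ++ l.map trTR, false) := by
  induction l generalizing acc with
  | nil => simp
  | cons c t ih =>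
    rw [List.foldl_cons, aStep_ne el acc c (by tauto), ih]
    simp

theorem aFold_exp (el l : List Char) (acc : List Char)
    (h : '+' ∈ el ∨ '-' ∈ el) :
    (l.foldl (aStep el) (acc, false)).1 = acc ++ expRewrite l := by
  induction hn : l.length using Nat.strong_induction_on generalizing l acc with
  | _ n ih =>
    match l, hn with
    | [], hn => simp [expRewrite_nil]
    | c :: t, hn =>
      by_cases hc : c = 'E'
      · subst hc
        rw [List.foldl_cons, show aStep el (acc, false) 'E' = (acc ++ ['⋅','1','0','^'], true) from by
          simp [aStep, h], expRewrite_cons_E]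
        match t with
        | [] => simp
        | d :: t' =>
          rw [List.foldl_cons, show aStep el (acc ++ ['⋅','1','0','^'], true) d
              = (acc ++ ['⋅','1','0','^'] ++ (if d = '+' then [] else [d]), false) from by
            by_cases hd : d = '+' <;> simp [aStep, hd]]
          rw [ih t'.length (by simp [← hn]) t' _ rfl]
          by_cases hd : d = '+' <;> simp [hd]
      · rw [List.foldl_cons, aStep_ne el acc c (by tauto), expRewrite_cons_ne c t hc,
            ih t.length (by rw [← hn]; simp) t _ rfl]
        simp

-- A's two-slice trailing test is exactly `endswith "00"`
theorem trim_cond_eq (answ : List Char) :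
    (PySem.List.slice answ (some (-2)) none = ['0', '0'] ∨
     PySem.List.slice answ (some (-3)) none = ['0', '0', '0']) ↔
    PySem.Chars.endswith answ ['0', '0'] = true := by
  rw [PySem.List.slice_from_neg_ofNat answ 2 (by omega),
      PySem.List.slice_from_neg_ofNat answ 3 (by omega),
      PySem.Chars.endswith_iff]
  constructor
  · rintro (h | h)
    · exact List.suffix_iff_eq_drop.mpr (by simpa using h.symm)
    · have h3 : ['0', '0', '0'] <:+ answ := List.suffix_iff_eq_drop.mpr (by simpa using h.symm)
      exact (by decide : ['0', '0'] <:+ (['0', '0', '0'] : List Char)).trans h3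
  · intro h
    left
    have := List.suffix_iff_eq_drop.mp h
    simpa using this.symm

theorem aToken_eq_bToken (el : List Char) : aToken el = bToken el := by
  have hA : (el.foldl (aStep el) ([], false)).1
      = (if '+' ∈ el ∨ '-' ∈ el then expRewrite el else el.map trTR) := by
    by_cases h : '+' ∈ el ∨ '-' ∈ el
    · rw [if_pos h]; simpa using aFold_exp el el [] h
    · rw [if_neg h, aFold_no_exp el el [] h]; simp
  unfold aToken bToken aTrim
  rw [hA]
  simp only [trim_cond_eq]

theorem rawTOfinal_spec : Claim_equal_rawTOfinal := by
  intro raw _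
  unfold Spec_rawTOfinal rawTOfinal rawTOfinal_alt
  congr 1
  have hg : (fun el => match PySem.Dict.get? symTable el with
      | some v => v.toList | none => aToken el.toList)
      = (fun el => match PySem.Dict.get? symTable el with
      | some v => v.toList | none => bToken el.toList) := by
    funext e
    cases PySem.Dict.get? symTable e <;> simp [aToken_eq_bToken]
  have hfa : (fun (final : List Char) (el : String) =>
      match PySem.Dict.get? symTable el with
      | some v => final ++ v.toList | none => final ++ aToken el.toList)
      = (fun (final : List Char) (el : String) => final ++
      match PySem.Dict.get? symTable el with
      | some v => v.toList | none => aToken el.toList) := by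
    funext f e
    cases PySem.Dict.get? symTable e <;> rfl
  rw [hfa, PySem.List.foldl_append_eq_flatMap, PySem.List.foldl_append_singleton_eq_map]
  simp [List.flatMap_def, hg]
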